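-- pv_equiv track=rewrite | github.com/T9404/EGE | Python/ЕГЭ2021;2022/25/Решение заданий. Поляков/4523.py | f
-- ===== SOURCE A (Python) =====
-- def f(x):
--     a = set()
--     for i in range(2, int(x**0.5)+1):
--         if x % i == 0:
--             a.add(i)
--             a.add(x//i)
--     if len(a) < 5:
--         return 0, 0
--     else:
--         b = sorted(list(a))
--         p_n = b[0]*b[1]*b[2]*b[3]*b[4]
--         return  p_n, b[4]
-- ===== SOURCE B (Python) =====
-- def f(x):
--     # factorize x by trial division, then multiply out prime-power combinations
--     fac = []
--     n = x
--     i = 2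
--     while i * i <= n:
--         if n % i == 0:
--             e = 0
--             while n % i == 0:
--                 n //= i
--                 e += 1
--             fac.append((i, e))
--         i += 1
--     if n > 1:
--         fac.append((n, 1))
--     divs = [1]
--     for p, e in fac:
--         pk = 1
--         new = []
--         for _ in range(e + 1):
--             new += [d * pk for d in divs]
--             pk *= p
--         divs = new
--     proper = [d for d in divs if d != 1 and d != x]
--     if len(proper) < 5:
--         return 0, 0
--     proper.sort()
--     return proper[0] * proper[1] * proper[2] * proper[3] * proper[4], proper[4]
-- ===== Notes on version B (the rewrite author's own statement) =====
-- stated objective: alternative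
-- what changed: B replaces A's collect-divisor/cofactor-pairs-into-a-set approach by prime factorization: it factorizes x by trial division (dividing each found prime out, so the square-root bound shrinks), then generates the complete divisor list by multiplying out prime-power combinations, drops the trivial divisors, sorts and takes the five smallest.
import Mathlib
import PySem

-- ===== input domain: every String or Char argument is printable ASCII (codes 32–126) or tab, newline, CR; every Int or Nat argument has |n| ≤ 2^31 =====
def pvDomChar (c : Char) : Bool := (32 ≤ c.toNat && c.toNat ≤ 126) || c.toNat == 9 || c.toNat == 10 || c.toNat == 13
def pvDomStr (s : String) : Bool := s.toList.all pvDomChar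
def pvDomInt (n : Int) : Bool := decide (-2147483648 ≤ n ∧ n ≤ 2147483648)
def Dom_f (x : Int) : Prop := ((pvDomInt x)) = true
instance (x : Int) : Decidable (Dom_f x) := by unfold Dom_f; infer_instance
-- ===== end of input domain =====

-- B replaces A's divisor/cofactor set collection by prime factorization followed by
-- enumeration of all divisors as prime-power products; return values only, no mutation.
-- ===== PORT A =====
-- int(x**0.5): for 0 ≤ x ≤ 2^31 the float power is exact, so int(x**0.5) = isqrt x;
-- negative x raises TypeError (excluded by Pre_f).
def f (x : Int) : Int × Int :=
  let r : Int := (Nat.sqrt x.toNat : Int)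
  let a : PySem.Set Int :=
    (PySem.List.pyRange 2 (r + 1) 1).foldl
      (fun a i =>
        if PySem.Int.mod x i == 0 then
          PySem.Set.add (PySem.Set.add a i) (PySem.Int.floordiv x i)
        else a)
      PySem.Set.empty
  if a.length < 5 then (0, 0)
  else
    let b := PySem.List.sorted a (fun v => v) false
    (PySem.List.pyGetD b 0 0 * PySem.List.pyGetD b 1 0 * PySem.List.pyGetD b 2 0 *
      PySem.List.pyGetD b 3 0 * PySem.List.pyGetD b 4 0, PySem.List.pyGetD b 4 0)

-- ===== PORT B =====
-- The two while loops of Source B, written as structural recursion on a fuel argument that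
-- only serves totality: fuel n.toNat (resp. (n+1-i).toNat) strictly exceeds the number
-- of iterations Python performs, so the guard never fires on a run Python completes.
def divOutGo : Nat → Int → Int → Int × Int
  | 0, n, _ => (n, 0)
  | fuel + 1, n, i =>
    if PySem.Int.mod n i = 0 then
      let t := divOutGo fuel (PySem.Int.floordiv n i) i
      (t.1, t.2 + 1)
    else (n, 0)
def divOut (n i : Int) : Int × Int := divOutGo n.toNat n i
def facLoopGo : Nat → Int → Int → List (Int × Int) × Int
  | 0, n, _ => ([], n)
  | fuel + 1, n, i =>
    if i * i ≤ n then
      if PySem.Int.mod n i = 0 then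
        let t := divOut n i
        let r := facLoopGo fuel t.1 (i + 1)
        ((i, t.2) :: r.1, r.2)
      else facLoopGo fuel n (i + 1)
    else ([], n)
def facLoop (n i : Int) : List (Int × Int) × Int := facLoopGo (n + 1 - i).toNat n i
def genStep (divs : List Int) (pe : Int × Int) : List Int :=
  ((PySem.List.pyRange 0 (pe.2 + 1) 1).foldl
     (fun s _ => (s.1 ++ divs.map (fun d => d * s.2), s.2 * pe.1)) ([], 1)).1
def f_alt (x : Int) : Int × Int :=
  let t := facLoop x 2
  let fac := if 1 < t.2 then t.1 ++ [(t.2, 1)] else t.1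
  let divs := fac.foldl genStep [1]
  let proper := divs.filter (fun d => d != 1 && d != x)
  if proper.length < 5 then (0, 0)
  else
    let b := PySem.List.sorted proper (fun v => v) false
    (PySem.List.pyGetD b 0 0 * PySem.List.pyGetD b 1 0 * PySem.List.pyGetD b 2 0 *
      PySem.List.pyGetD b 3 0 * PySem.List.pyGetD b 4 0, PySem.List.pyGetD b 4 0)

-- ===== PRECONDITION & SPEC =====
-- Pre_f excludes negative x, on which A raises TypeError (x**0.5 is a complex number).
def Pre_f (x : Int) : Prop := 0 ≤ x
instance (x : Int) : Decidable (Pre_f x) := by unfold Pre_f; infer_instance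
def pvWitness_f : Int := 36

def Spec_f (x : Int) (out : Int × Int) : Prop := out = f_alt x
instance (x : Int) (out : Int × Int) : Decidable (Spec_f x out) := by unfold Spec_f; infer_instance

-- ===== CLAIM =====
def Claim_equal_f : Prop := ∀ (x : Int), Dom_f x → Pre_f x → Spec_f x (f x)

-- ===== LEMMAS AND PROOFS =====

def prodFac (fac : List (Int × Int)) : Int := (fac.map (fun pe => pe.1 ^ pe.2.toNat)).prod
theorem divOutGo_spec : ∀ (fuel : Nat) (n i : Int), 1 ≤ n → 2 ≤ i → n.toNat ≤ fuel →
    n = (divOutGo fuel n i).1 * i ^ (divOutGo fuel n i).2.toNat ∧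
    ¬ i ∣ (divOutGo fuel n i).1 ∧ 0 ≤ (divOutGo fuel n i).2 ∧
    1 ≤ (divOutGo fuel n i).1 ∧ (divOutGo fuel n i).1 ≤ n := by
  intro fuel
  induction fuel with
  | zero => intro n i hn hi hf; omega
  | succ fuel ih =>
    intro n i hn hi hf
    by_cases hm : PySem.Int.mod n i = 0
    · have hfd : PySem.Int.floordiv n i = n / i := PySem.Int.floordiv_eq_ediv_of_pos (by omega)
      obtain ⟨k, hk⟩ := (PySem.Int.mod_eq_zero_iff_dvd n i).mp hm
      have hk1 : 1 ≤ k := by nlinarith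
      have hkn : k < n := by nlinarith
      have hq : n / i = k := by rw [hk, Int.mul_ediv_cancel_left _ (by omega : i ≠ 0)]
      have e : divOutGo (fuel + 1) n i =
          ((divOutGo fuel k i).1, (divOutGo fuel k i).2 + 1) := by
        show (if PySem.Int.mod n i = 0 then _ else _) = _
        rw [if_pos hm]
        rw [hfd, hq]
      obtain ⟨ih1, ih2, ih3, ih4, ih5⟩ := ih k i hk1 hi (by omega)
      rw [e]
      dsimp only
      refine ⟨?_, ih2, by omega, ih4, by omega⟩
      have ht : ((divOutGo fuel k i).2 + 1).toNat = (divOutGo fuel k i).2.toNat + 1 := by omega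
      rw [ht, pow_succ, hk]
      linear_combination i * ih1
    · have e : divOutGo (fuel + 1) n i = (n, 0) := by
        show (if PySem.Int.mod n i = 0 then _ else _) = _
        rw [if_neg hm]
      rw [e]
      refine ⟨by norm_num, ?_, le_refl 0, hn, le_refl n⟩
      intro hd
      exact hm ((PySem.Int.mod_eq_zero_iff_dvd n i).mpr hd)

theorem divOut_spec (n i : Int) : 1 ≤ n → 2 ≤ i →
    n = (divOut n i).1 * i ^ (divOut n i).2.toNat ∧ ¬ i ∣ (divOut n i).1 ∧ 0 ≤ (divOut n i).2 := by
  intro hn hi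
  obtain ⟨h1, h2, h3, _, _⟩ := divOutGo_spec n.toNat n i hn hi (le_refl _)
  exact ⟨h1, h2, h3⟩

theorem divOut_le (n i : Int) : 1 ≤ n → 2 ≤ i → 1 ≤ (divOut n i).1 ∧ (divOut n i).1 ≤ n := by
  intro hn hi
  obtain ⟨_, _, _, h4, h5⟩ := divOutGo_spec n.toNat n i hn hi (le_refl _)
  exact ⟨h4, h5⟩
theorem facLoopGo_spec : ∀ (fuel : Nat) (n i : Int), 2 ≤ i → 1 ≤ n → (n + 1 - i).toNat ≤ fuel →
    (∀ j, 2 ≤ j → j < i → ¬ j ∣ n) →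
    n = (facLoopGo fuel n i).2 * prodFac (facLoopGo fuel n i).1 ∧
    (∀ pe ∈ (facLoopGo fuel n i).1, i ≤ pe.1 ∧ 0 ≤ pe.2 ∧ ∀ j, 2 ≤ j → j < pe.1 → ¬ j ∣ pe.1) ∧
    (facLoopGo fuel n i).1.Pairwise (fun a b => a.1 < b.1) ∧
    1 ≤ (facLoopGo fuel n i).2 ∧
    (∀ j, 2 ≤ j → j * j ≤ (facLoopGo fuel n i).2 → ¬ j ∣ (facLoopGo fuel n i).2) ∧
    ((facLoopGo fuel n i).2 = 1 ∨ i ≤ (facLoopGo fuel n i).2) ∧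
    (∀ pe ∈ (facLoopGo fuel n i).1, (facLoopGo fuel n i).2 = 1 ∨ pe.1 < (facLoopGo fuel n i).2) := by
  have base : ∀ (n i : Int), 2 ≤ i → 1 ≤ n →
      ¬ (i * i ≤ n) → (∀ j, 2 ≤ j → j < i → ¬ j ∣ n) →
      n = n * prodFac ([] : List (Int × Int)) ∧
      (∀ pe ∈ ([] : List (Int × Int)), i ≤ pe.1 ∧ 0 ≤ pe.2 ∧ ∀ j, 2 ≤ j → j < pe.1 → ¬ j ∣ pe.1) ∧
      ([] : List (Int × Int)).Pairwise (fun a b => a.1 < b.1) ∧ 1 ≤ n ∧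
      (∀ j, 2 ≤ j → j * j ≤ n → ¬ j ∣ n) ∧ (n = 1 ∨ i ≤ n) ∧
      (∀ pe ∈ ([] : List (Int × Int)), n = 1 ∨ pe.1 < n) := by
    rintro n i hi hn hii hns
    refine ⟨by simp [prodFac], by simp, List.Pairwise.nil, hn, ?_, ?_, by simp⟩
    · intro j hj2 hjj hjd
      have hji : j < i := by nlinarith
      exact hns j hj2 hji hjd
    · rcases lt_or_ge n 2 with h2 | h2
      · exact Or.inl (by omega)
      · refine Or.inr ?_
        by_contra hni
        exact hns n h2 (by omega) dvd_rfl
  intro fuel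
  induction fuel with
  | zero =>
    intro n i hi hn hf hns
    have hni : n + 1 ≤ i := by omega
    have hii : ¬ (i * i ≤ n) := fun hc => by nlinarith
    have e : facLoopGo 0 n i = ([], n) := rfl
    rw [e]
    exact base n i hi hn hii hns
  | succ fuel ih =>
    intro n i hi hn hf hns
    by_cases hii : i * i ≤ n
    · have hin : i ≤ n := by nlinarith
      by_cases hm : PySem.Int.mod n i = 0
      · obtain ⟨hd1, hd2, hd3⟩ := divOut_spec n i hn hi
        obtain ⟨hl1, hl2⟩ := divOut_le n i hn hi
        have hidvd : i ∣ n := (PySem.Int.mod_eq_zero_iff_dvd n i).mp hm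
        have ht1n : (divOut n i).1 ∣ n := ⟨i ^ (divOut n i).2.toNat, hd1⟩
        have hns' : ∀ j, 2 ≤ j → j < i + 1 → ¬ j ∣ (divOut n i).1 := by
          intro j hj2 hji hjd
          rcases lt_or_eq_of_le (by omega : j ≤ i) with hlt | rfl
          · exact hns j hj2 hlt (hjd.trans ht1n)
          · exact hd2 hjd
        have e : facLoopGo (fuel + 1) n i =
            ((i, (divOut n i).2) :: (facLoopGo fuel (divOut n i).1 (i + 1)).1,
              (facLoopGo fuel (divOut n i).1 (i + 1)).2) := by
          show (if i * i ≤ n then _ else _) = _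
          rw [if_pos hii, if_pos hm]
        obtain ⟨a1, a2, a3, a4, a5, a6, a7⟩ := ih (divOut n i).1 (i + 1) (by omega) hl1
          (by omega) hns'
        rw [e]
        dsimp only
        refine ⟨?_, ?_, ?_, a4, a5, ?_, ?_⟩
        · simp only [prodFac, List.map_cons, List.prod_cons] at a1 ⊢
          linear_combination hd1 + (i ^ (divOut n i).2.toNat) * a1
        · intro pe hpe
          rcases List.mem_cons.mp hpe with rfl | hpe'
          · refine ⟨le_refl i, hd3, ?_⟩
            intro j hj2 hji hjd
            exact hns j hj2 hji (hjd.trans hidvd)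
          · obtain ⟨b1, b2, b3⟩ := a2 pe hpe'
            exact ⟨by omega, b2, b3⟩
        · refine List.pairwise_cons.mpr ⟨?_, a3⟩
          intro pe hpe
          have := (a2 pe hpe).1
          omega
        · rcases a6 with h1 | h1
          · exact Or.inl h1
          · exact Or.inr (by omega)
        · intro pe hpe
          rcases List.mem_cons.mp hpe with rfl | hpe'
          · rcases a6 with h1 | h1
            · exact Or.inl h1
            · exact Or.inr (by omega)
          · exact a7 pe hpe'
      · have hns' : ∀ j, 2 ≤ j → j < i + 1 → ¬ j ∣ n := by
          intro j hj2 hji hjd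
          rcases lt_or_eq_of_le (by omega : j ≤ i) with hlt | rfl
          · exact hns j hj2 hlt hjd
          · exact hm ((PySem.Int.mod_eq_zero_iff_dvd n j).mpr hjd)
        have e : facLoopGo (fuel + 1) n i = facLoopGo fuel n (i + 1) := by
          show (if i * i ≤ n then _ else _) = _
          rw [if_pos hii, if_neg hm]
        obtain ⟨a1, a2, a3, a4, a5, a6, a7⟩ := ih n (i + 1) (by omega) hn (by omega) hns'
        rw [e]
        refine ⟨a1, ?_, a3, a4, a5, ?_, a7⟩
        · intro pe hpe
          obtain ⟨b1, b2, b3⟩ := a2 pe hpe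
          exact ⟨by omega, b2, b3⟩
        · rcases a6 with h1 | h1
          · exact Or.inl h1
          · exact Or.inr (by omega)
    · have e : facLoopGo (fuel + 1) n i = ([], n) := by
        show (if i * i ≤ n then _ else _) = _
        rw [if_neg hii]
      rw [e]
      exact base n i hi hn hii hns

theorem facLoop_spec (n i : Int) : 2 ≤ i → 1 ≤ n → (∀ j, 2 ≤ j → j < i → ¬ j ∣ n) →
    n = (facLoop n i).2 * prodFac (facLoop n i).1 ∧
    (∀ pe ∈ (facLoop n i).1, i ≤ pe.1 ∧ 0 ≤ pe.2 ∧ ∀ j, 2 ≤ j → j < pe.1 → ¬ j ∣ pe.1) ∧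
    (facLoop n i).1.Pairwise (fun a b => a.1 < b.1) ∧
    1 ≤ (facLoop n i).2 ∧
    (∀ j, 2 ≤ j → j * j ≤ (facLoop n i).2 → ¬ j ∣ (facLoop n i).2) ∧
    ((facLoop n i).2 = 1 ∨ i ≤ (facLoop n i).2) ∧
    (∀ pe ∈ (facLoop n i).1, (facLoop n i).2 = 1 ∨ pe.1 < (facLoop n i).2) := by
  intro hi hn hns
  exact facLoopGo_spec (n + 1 - i).toNat n i hi hn (le_refl _) hns
theorem prime_of_nosmall (p : Int) (h2 : 2 ≤ p) (h : ∀ j, 2 ≤ j → j < p → ¬ j ∣ p) : Prime p := by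
  rw [Int.prime_iff_natAbs_prime]
  rw [Nat.prime_def_lt]
  have hab : (p.natAbs : Int) = p := Int.natAbs_of_nonneg (by omega)
  refine ⟨by omega, ?_⟩
  intro m hm hmd
  by_contra hm1
  have hm0 : m ≠ 0 := by
    rintro rfl
    have : p.natAbs = 0 := Nat.eq_zero_of_zero_dvd hmd
    omega
  have hm2 : 2 ≤ m := by omega
  have : (m : Int) ∣ p := by
    rw [← hab]
    exact_mod_cast hmd
  exact h m (by exact_mod_cast hm2) (by omega) this

theorem nosmall_of_sqrtfree (m : Int) (h1 : 2 ≤ m) (h : ∀ j, 2 ≤ j → j * j ≤ m → ¬ j ∣ m) :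
    ∀ j, 2 ≤ j → j < m → ¬ j ∣ m := by
  intro j hj2 hjm hjd
  rcases le_or_gt (j * j) m with hle | hgt
  · exact h j hj2 hle hjd
  · obtain ⟨k, hk⟩ := hjd
    have hk1 : 1 ≤ k := by nlinarith
    have hk2 : 2 ≤ k := by
      rcases eq_or_lt_of_le hk1 with rfl | h2
      · omega
      · omega
    have hkj : k < j := by nlinarith
    have hkk : k * k ≤ m := by nlinarith
    exact h k hk2 hkk ⟨j, by linarith [hk]⟩
theorem genFold (divs : List Int) (p : Int) : ∀ (L : List Int) (acc : List Int) (pk : Int),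
    L.foldl (fun s _ => (s.1 ++ divs.map (fun d => d * s.2), s.2 * p)) (acc, pk) =
    (acc ++ (List.range L.length).flatMap (fun a => divs.map (fun d => d * (pk * p ^ a))),
      pk * p ^ L.length) := by
  intro L
  induction L with
  | nil => intro acc pk; simp
  | cons x L ih =>
    intro acc pk
    rw [List.foldl_cons]
    dsimp only
    rw [ih]
    rw [List.length_cons, List.range_succ_eq_map]
    rw [Prod.mk.injEq]
    constructor
    · simp only [List.flatMap_cons, List.flatMap_map, pow_zero, mul_one, pow_succ,
        List.append_assoc]
      congr 2
      apply congrArg (List.flatMap · (List.range L.length))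
      funext a
      apply congrArg (List.map · divs)
      funext d
      ring
    · rw [pow_succ]
      ring

theorem genStep_eq (divs : List Int) (p e : Int) (he : 0 ≤ e) :
    genStep divs (p, e) = (List.range (e.toNat + 1)).flatMap (fun a => divs.map (fun d => d * p ^ a)) := by
  unfold genStep
  rw [genFold]
  have hlen : (PySem.List.pyRange 0 (e + 1) 1).length = e.toNat + 1 := by
    rw [PySem.List.length_pyRange_one]; omega
  rw [hlen]
  simp [one_mul]
theorem dvd_split (p M : Int) (hp : Prime p) (hp0 : 0 < p) (_hpM : ¬ p ∣ M) :
    ∀ (e : ℕ) (c : Int), 0 < c → c ∣ M * p ^ e →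
      ∃ d a, d ∣ M ∧ 0 < d ∧ a ≤ e ∧ c = d * p ^ a := by
  intro e
  induction e with
  | zero =>
    intro c hc hcd
    exact ⟨c, 0, by simpa using hcd, hc, le_refl 0, by ring⟩
  | succ e ih =>
    intro c hc hcd
    by_cases hpc : p ∣ c
    · obtain ⟨c', rfl⟩ := hpc
      have hc' : 0 < c' := by nlinarith
      have hdd : c' ∣ M * p ^ e := by
        have h1 : p * c' ∣ p * (M * p ^ e) := by
          have he : M * p ^ (e + 1) = p * (M * p ^ e) := by ring
          rw [← he]; exact hcd
        exact (mul_dvd_mul_iff_left (by omega : p ≠ 0)).mp h1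
      obtain ⟨d, a, hd1, hd2, hd3, hd4⟩ := ih c' hc' hdd
      exact ⟨d, a + 1, hd1, hd2, by omega, by rw [hd4]; ring⟩
    · have hcop : IsCoprime c p := by
        rw [Int.isCoprime_iff_gcd_eq_one]
        have hq : p.natAbs.Prime := Int.prime_iff_natAbs_prime.mp hp
        have hnd : ¬ p.natAbs ∣ c.natAbs := fun hd => hpc (Int.natAbs_dvd_natAbs.mp hd)
        have hco : Nat.Coprime p.natAbs c.natAbs := (Nat.Prime.coprime_iff_not_dvd hq).mpr hnd
        show Nat.gcd c.natAbs p.natAbs = 1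
        exact hco.symm
      have hcM : c ∣ M := (hcop.pow_right).dvd_of_dvd_mul_right hcd
      exact ⟨c, 0, hcM, hc, by omega, by ring⟩

theorem blocks_nodup (divs : List Int) (p M : Int) (hp0 : 2 ≤ p) (hnd : divs.Nodup)
    (hmem : ∀ d, d ∈ divs ↔ d ∣ M ∧ 0 < d) (hpM : ¬ p ∣ M) :
    ∀ n : ℕ, ((List.range n).flatMap (fun a => divs.map (fun d => d * p ^ a))).Nodup := by
  intro n
  induction n with
  | zero => simp
  | succ n ih =>
    rw [List.range_succ, List.flatMap_append, List.flatMap_singleton]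
    rw [List.nodup_append]
    refine ⟨ih, ?_, ?_⟩
    · exact hnd.map (mul_left_injective₀ (pow_ne_zero _ (by omega : p ≠ 0)))
    · intro x hx1
      simp only [List.mem_flatMap, List.mem_map, List.mem_range] at hx1
      obtain ⟨a, ha, d, hd, hde⟩ := hx1
      intro y hy
      obtain ⟨d', hd', hde'⟩ := List.mem_map.mp hy
      intro hxy
      have hdM : d ∣ M := ((hmem d).mp hd).1
      have hna : n - a + a = n := by omega
      have heq : d * p ^ a = d' * p ^ (n - a) * p ^ a := by
        rw [hde, hxy, ← hde', mul_assoc, ← pow_add, hna]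
      have hc : d = d' * p ^ (n - a) := mul_right_cancel₀ (pow_ne_zero _ (by omega : p ≠ 0)) heq
      have hpd : p ∣ d := by
        rw [hc]
        exact Dvd.dvd.mul_left (dvd_pow_self p (by omega : n - a ≠ 0)) d'
      exact hpM (hpd.trans hdM)

theorem genStep_spec (p e M : Int) (hp : Prime p) (hp2 : 2 ≤ p) (hpM : ¬ p ∣ M) (_hM : 0 < M)
    (he : 0 ≤ e) (divs : List Int) (hnd : divs.Nodup) (hmem : ∀ d, d ∈ divs ↔ d ∣ M ∧ 0 < d) :
    (genStep divs (p, e)).Nodup ∧ ∀ c, c ∈ genStep divs (p, e) ↔ c ∣ M * p ^ e.toNat ∧ 0 < c := by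
  rw [genStep_eq divs p e he]
  refine ⟨blocks_nodup divs p M hp2 hnd hmem hpM _, ?_⟩
  intro c
  simp only [List.mem_flatMap, List.mem_map, List.mem_range]
  constructor
  · rintro ⟨a, ha, d, hd, rfl⟩
    obtain ⟨hdM, hdp⟩ := (hmem d).mp hd
    refine ⟨mul_dvd_mul hdM (pow_dvd_pow p (by omega)), ?_⟩
    exact mul_pos hdp (pow_pos (by omega) a)
  · rintro ⟨hcd, hc⟩
    obtain ⟨d, a, hd1, hd2, hd3, hd4⟩ := dvd_split p M hp (by omega) hpM e.toNat c hc hcd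
    exact ⟨a, by omega, d, (hmem d).mpr ⟨hd1, hd2⟩, hd4.symm⟩

theorem divsFold_spec (fac : List (Int × Int)) : ∀ (M : Int) (divs : List Int), 0 < M →
    divs.Nodup → (∀ d, d ∈ divs ↔ d ∣ M ∧ 0 < d) →
    (∀ pe ∈ fac, 2 ≤ pe.1 ∧ Prime pe.1 ∧ 0 ≤ pe.2 ∧ ¬ pe.1 ∣ M) →
    fac.Pairwise (fun a b => a.1 ≠ b.1) →
    (fac.foldl genStep divs).Nodup ∧
    ∀ c, c ∈ fac.foldl genStep divs ↔ c ∣ M * prodFac fac ∧ 0 < c := by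
  induction fac with
  | nil =>
    intro M divs hM hnd hmem _ _
    refine ⟨hnd, ?_⟩
    intro c
    simp only [List.foldl_nil, prodFac, List.map_nil, List.prod_nil, mul_one]
    exact hmem c
  | cons pe fac ih =>
    intro M divs hM hnd hmem hfac hpw
    obtain ⟨hp2, hpp, hpe, hpM⟩ := hfac pe (by simp)
    obtain ⟨g1, g2⟩ := genStep_spec pe.1 pe.2 M hpp hp2 hpM hM hpe divs hnd hmem
    have hM' : 0 < M * pe.1 ^ pe.2.toNat := mul_pos hM (pow_pos (by omega) _)
    have hfac' : ∀ qe ∈ fac, 2 ≤ qe.1 ∧ Prime qe.1 ∧ 0 ≤ qe.2 ∧ ¬ qe.1 ∣ M * pe.1 ^ pe.2.toNat := by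
      intro qe hqe
      obtain ⟨hq2, hqp, hqe2, hqM⟩ := hfac qe (List.mem_cons_of_mem _ hqe)
      have hne : pe.1 ≠ qe.1 := (List.pairwise_cons.mp hpw).1 qe hqe
      refine ⟨hq2, hqp, hqe2, ?_⟩
      intro hdvd
      rcases (Prime.dvd_mul hqp).mp hdvd with h | h
      · exact hqM h
      · have hqpdvd : qe.1 ∣ pe.1 := hqp.dvd_of_dvd_pow h
        obtain ⟨t, ht⟩ := hqpdvd
        rcases hpp.irreducible.isUnit_or_isUnit ht with hu | hu
        · rcases Int.isUnit_iff.mp hu with h1 | h1 <;> omega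
        · rcases Int.isUnit_iff.mp hu with h1 | h1
          · rw [h1, mul_one] at ht
            exact hne ht
          · rw [h1] at ht
            omega
    obtain ⟨b1, b2⟩ := ih (M * pe.1 ^ pe.2.toNat) (genStep divs pe) hM' g1 g2 hfac'
      (List.pairwise_cons.mp hpw).2
    rw [List.foldl_cons]
    refine ⟨b1, ?_⟩
    intro c
    rw [b2 c]
    have : M * pe.1 ^ pe.2.toNat * prodFac fac = M * prodFac (pe :: fac) := by
      simp only [prodFac, List.map_cons, List.prod_cons]
      ring
    rw [this]
theorem foldA_spec (x : Int) (L : List Int) (s : PySem.Set Int) (hs : s.Nodup) :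
    (L.foldl (fun a i =>
        if PySem.Int.mod x i == 0 then
          PySem.Set.add (PySem.Set.add a i) (PySem.Int.floordiv x i)
        else a) s).Nodup ∧
    ∀ d, d ∈ L.foldl (fun a i =>
        if PySem.Int.mod x i == 0 then
          PySem.Set.add (PySem.Set.add a i) (PySem.Int.floordiv x i)
        else a) s ↔
      d ∈ s ∨ ∃ i ∈ L, PySem.Int.mod x i = 0 ∧ (d = i ∨ d = PySem.Int.floordiv x i) := by
  induction L generalizing s with
  | nil => simpa using hs
  | cons a L ih =>
    by_cases hc : PySem.Int.mod x a = 0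
    · obtain ⟨h1, h2⟩ := ih (PySem.Set.add (PySem.Set.add s a) (PySem.Int.floordiv x a))
        (PySem.Set.nodup_add _ _ (PySem.Set.nodup_add _ _ hs))
      have hca : (PySem.Int.mod x a == 0) = true := by simp [hc]
      refine ⟨by rw [List.foldl_cons, if_pos hca]; exact h1, fun d => ?_⟩
      rw [List.foldl_cons, if_pos hca, h2 d]
      simp only [PySem.Set.mem_add]
      constructor
      · rintro (((hd | hda) | hda) | ⟨i, hiL, hmi, hdi⟩)
        · exact Or.inl hd
        · exact Or.inr ⟨a, by simp, hc, Or.inl hda⟩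
        · exact Or.inr ⟨a, by simp, hc, Or.inr hda⟩
        · exact Or.inr ⟨i, List.mem_cons_of_mem a hiL, hmi, hdi⟩
      · rintro (hd | ⟨i, hiL, hmi, hdi⟩)
        · exact Or.inl (Or.inl (Or.inl hd))
        · rcases List.mem_cons.mp hiL with rfl | hiL'
          · rcases hdi with hda | hda
            · exact Or.inl (Or.inl (Or.inr hda))
            · exact Or.inl (Or.inr hda)
          · exact Or.inr ⟨i, hiL', hmi, hdi⟩
    · have hca : ¬ ((PySem.Int.mod x a == 0) = true) := by simp [hc]
      obtain ⟨h1, h2⟩ := ih s hs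
      refine ⟨by rw [List.foldl_cons, if_neg hca]; exact h1, fun d => ?_⟩
      rw [List.foldl_cons, if_neg hca, h2 d]
      constructor
      · rintro (hd | ⟨i, hiL, hmi, hdi⟩)
        · exact Or.inl hd
        · exact Or.inr ⟨i, List.mem_cons_of_mem a hiL, hmi, hdi⟩
      · rintro (hd | ⟨i, hiL, hmi, hdi⟩)
        · exact Or.inl hd
        · rcases List.mem_cons.mp hiL with rfl | hiL'
          · exact absurd hmi hc
          · exact Or.inr ⟨i, hiL', hmi, hdi⟩
theorem setA_char (x : Int) (hx : 1 ≤ x) (d : Int) :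
    (∃ i ∈ PySem.List.pyRange 2 ((Nat.sqrt x.toNat : Int) + 1) 1,
        PySem.Int.mod x i = 0 ∧ (d = i ∨ d = PySem.Int.floordiv x i)) ↔
    (d ∣ x ∧ 2 ≤ d ∧ d < x) := by
  set r : Int := (Nat.sqrt x.toNat : Int) with hr
  have hxEq : (x.toNat : Int) = x := Int.toNat_of_nonneg (by omega)
  have hr0 : 0 ≤ r := by positivity
  have hr1 : r * r ≤ x := by
    have h := Nat.sqrt_le' x.toNat
    rw [pow_two] at h
    have h2 : ((Nat.sqrt x.toNat : Nat) : Int) * ((Nat.sqrt x.toNat : Nat) : Int) ≤ ((x.toNat : Nat) : Int) := by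
      exact_mod_cast h
    rw [hxEq] at h2
    exact h2
  have hr2 : x < (r + 1) * (r + 1) := by
    have h := Nat.lt_succ_sqrt' x.toNat
    rw [Nat.succ_eq_add_one, pow_two] at h
    have h2 : ((x.toNat : Nat) : Int) < (((Nat.sqrt x.toNat : Nat) : Int) + 1) * (((Nat.sqrt x.toNat : Nat) : Int) + 1) := by
      exact_mod_cast h
    rw [hxEq] at h2
    exact h2
  constructor
  · rintro ⟨i, hiR, hmi, hdi⟩
    rw [PySem.List.mem_pyRange_one] at hiR
    have hi2 : 2 ≤ i := hiR.1
    have hir : i ≤ r := by omega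
    have hisq : i * i ≤ x := by nlinarith
    have hidvd : i ∣ x := (PySem.Int.mod_eq_zero_iff_dvd x i).mp hmi
    have hfd : PySem.Int.floordiv x i = x / i := PySem.Int.floordiv_eq_ediv_of_pos (by omega)
    have hq : x = i * (x / i) := (Int.mul_ediv_cancel' hidvd).symm
    have hq2 : i ≤ x / i := by
      rw [Int.le_ediv_iff_mul_le (by omega : (0:Int) < i)]
      exact hisq
    rcases hdi with rfl | rfl
    · exact ⟨hidvd, hi2, by nlinarith⟩
    · rw [hfd]
      refine ⟨⟨i, by linarith [hq]⟩, by omega, ?_⟩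
      nlinarith
  · rintro ⟨hdvd, hd2, hdx⟩
    have hc : x = d * (x / d) := (Int.mul_ediv_cancel' hdvd).symm
    set q := x / d with hq
    have hc1 : 1 ≤ q := by nlinarith [hc]
    have hc2 : 2 ≤ q := by
      rcases eq_or_lt_of_le hc1 with h1 | h1
      · exfalso; rw [← h1] at hc; omega
      · omega
    rcases le_or_gt d r with hdr | hdr
    · refine ⟨d, PySem.List.mem_pyRange_one.mpr ⟨hd2, by omega⟩,
        (PySem.Int.mod_eq_zero_iff_dvd x d).mpr hdvd, Or.inl rfl⟩
    · have hcr : q ≤ r := by nlinarith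
      refine ⟨q, PySem.List.mem_pyRange_one.mpr ⟨hc2, by omega⟩, ?_, Or.inr ?_⟩
      · exact (PySem.Int.mod_eq_zero_iff_dvd x q).mpr ⟨d, by linarith [hc]⟩
      · rw [PySem.Int.floordiv_eq_ediv_of_pos (by omega : (0:Int) < q)]
        rw [hc, Int.mul_ediv_cancel _ (by omega : q ≠ 0)]

theorem main_eq (x : Int) (hx : 0 ≤ x) : f x = f_alt x := by
  rcases eq_or_lt_of_le hx with h0 | hx1
  · have h0' : x = 0 := h0.symm
    subst h0'
    decide
  · have hx1 : 1 ≤ x := hx1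
    -- B side data
    obtain ⟨a1, a2, a3, a4, a5, a6, a7⟩ := facLoop_spec x 2 (le_refl 2) hx1 (by omega)
    set t := facLoop x 2 with hT
    set facAll : List (Int × Int) := if 1 < t.2 then t.1 ++ [(t.2, 1)] else t.1 with hFA
    have hprod : prodFac facAll = x := by
      rw [hFA]
      split
      · rename_i hm
        simp only [prodFac, List.map_append, List.prod_append, List.map_cons, List.map_nil,
          List.prod_cons, List.prod_nil]
        have : ((1:Int).toNat) = 1 := rfl
        rw [this, pow_one, mul_one]
        simp only [prodFac] at a1
        linarith [a1]
      · rename_i hm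
        have hm1 : t.2 = 1 := by omega
        simp only [prodFac] at a1 ⊢
        rw [hm1] at a1
        linarith [a1]
    have hfacts : ∀ pe ∈ facAll, 2 ≤ pe.1 ∧ Prime pe.1 ∧ 0 ≤ pe.2 ∧ ¬ pe.1 ∣ (1:Int) := by
      intro pe hpe
      have hcore : 2 ≤ pe.1 ∧ 0 ≤ pe.2 ∧ ∀ j, 2 ≤ j → j < pe.1 → ¬ j ∣ pe.1 := by
        rw [hFA] at hpe
        by_cases hm : 1 < t.2
        · rw [if_pos hm] at hpe
          rcases List.mem_append.mp hpe with h | h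
          · obtain ⟨b1, b2, b3⟩ := a2 pe h
            exact ⟨by omega, b2, b3⟩
          · simp at h
            subst h
            exact ⟨by omega, by norm_num, nosmall_of_sqrtfree t.2 (by omega) a5⟩
        · rw [if_neg hm] at hpe
          obtain ⟨b1, b2, b3⟩ := a2 pe hpe
          exact ⟨by omega, b2, b3⟩
      obtain ⟨c1, c2, c3⟩ := hcore
      refine ⟨c1, prime_of_nosmall pe.1 c1 c3, c2, ?_⟩
      intro hd
      have := Int.le_of_dvd one_pos hd
      omega
    have hpw : facAll.Pairwise (fun a b => a.1 ≠ b.1) := by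
      rw [hFA]
      split
      · rename_i hm
        rw [List.pairwise_append]
        refine ⟨a3.imp (fun h => ne_of_lt h), by simp, ?_⟩
        intro a ha b hb
        simp only [List.mem_singleton] at hb
        subst hb
        rcases a7 a ha with h1 | h1
        · omega
        · exact ne_of_lt h1
      · exact a3.imp (fun h => ne_of_lt h)
    have hmem1 : ∀ d, d ∈ ([1] : List Int) ↔ d ∣ (1:Int) ∧ 0 < d := by
      intro d
      simp only [List.mem_singleton]
      constructor
      · rintro rfl; exact ⟨dvd_refl 1, one_pos⟩
      · rintro ⟨hd, hp⟩
        rcases Int.isUnit_iff.mp (isUnit_of_dvd_one hd) with h | h <;> omega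
    obtain ⟨hDnd, hDmem⟩ := divsFold_spec facAll 1 [1] one_pos (by simp) hmem1 hfacts hpw
    set D := facAll.foldl genStep [1] with hD
    have hDmem' : ∀ c, c ∈ D ↔ c ∣ x ∧ 0 < c := by
      intro c
      rw [hDmem c, hprod, one_mul]
    set proper := D.filter (fun d => d != 1 && d != x) with hP
    have hPnd : proper.Nodup := hDnd.filter _
    have hPmem : ∀ c, c ∈ proper ↔ c ∣ x ∧ 2 ≤ c ∧ c < x := by
      intro c
      rw [hP, List.mem_filter]
      simp only [Bool.and_eq_true, bne_iff_ne, ne_eq]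
      rw [hDmem' c]
      constructor
      · rintro ⟨⟨hdvd, hpos⟩, hne1, hnex⟩
        have hle : c ≤ x := Int.le_of_dvd (by omega) hdvd
        exact ⟨hdvd, by omega, by omega⟩
      · rintro ⟨hdvd, h2, hlt⟩
        exact ⟨⟨hdvd, by omega⟩, by omega, by omega⟩
    -- A side data
    obtain ⟨hnd, hmemA⟩ := foldA_spec x (PySem.List.pyRange 2 ((Nat.sqrt x.toNat : Int) + 1) 1)
      PySem.Set.empty (by simp [PySem.Set.empty])
    set setA : PySem.Set Int := (PySem.List.pyRange 2 ((Nat.sqrt x.toNat : Int) + 1) 1).foldl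
        (fun a i =>
          if PySem.Int.mod x i == 0 then
            PySem.Set.add (PySem.Set.add a i) (PySem.Int.floordiv x i)
          else a) PySem.Set.empty with hSA
    have hAmem : ∀ d, d ∈ setA ↔ d ∣ x ∧ 2 ≤ d ∧ d < x := by
      intro d
      rw [hmemA d]
      simp only [PySem.Set.empty, List.not_mem_nil, false_or]
      exact setA_char x hx1 d
    -- permutation
    have hperm : setA.Perm proper := by
      rw [List.perm_ext_iff_of_nodup hnd hPnd]
      intro a
      rw [hAmem a, hPmem a]
    have hlen : setA.length = proper.length := hperm.length_eq
    have hsorted : PySem.List.sorted setA (fun v => v) false = PySem.List.sorted proper (fun v => v) false :=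
      (PySem.List.sorted_id_eq_sorted_id_iff_perm setA proper).mpr hperm
    show f x = f_alt x
    rw [f, f_alt]
    dsimp only
    rw [← hT, ← hFA, ← hD, ← hP, ← hSA, hlen, hsorted]

-- ===== VERDICT =====
theorem f_spec : Claim_equal_f := by
  intro x _ hpre
  unfold Spec_f
  exact main_eq x hpre
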